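-- pv_equiv track=rewrite | github.com/esteroliver/ProgramacaoComputadores | lista-funcoes-recursivas/questao-5.py | quant_alg
-- ===== SOURCE A (Python) =====
-- def quant_alg(num):
--     quant = 0
--     if num == 1 or num == 0:
--         return 1
--     elif num//2 > 0:
--         quant += 1
--     quant += quant_alg(num//2)
--     return quant
-- ===== SOURCE B (Python) =====
-- def quant_alg(num):
--     # number of binary digits of num, with 0 counting as one digit
--     return max(1, num.bit_length())
-- ===== Notes on version B (the rewrite author's own statement) =====
-- stated objective: simpler
-- what changed: Replaces the recursive halving count by the closed form max(1, num.bit_length()), eliminating the recursion entirely.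
import Mathlib
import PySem

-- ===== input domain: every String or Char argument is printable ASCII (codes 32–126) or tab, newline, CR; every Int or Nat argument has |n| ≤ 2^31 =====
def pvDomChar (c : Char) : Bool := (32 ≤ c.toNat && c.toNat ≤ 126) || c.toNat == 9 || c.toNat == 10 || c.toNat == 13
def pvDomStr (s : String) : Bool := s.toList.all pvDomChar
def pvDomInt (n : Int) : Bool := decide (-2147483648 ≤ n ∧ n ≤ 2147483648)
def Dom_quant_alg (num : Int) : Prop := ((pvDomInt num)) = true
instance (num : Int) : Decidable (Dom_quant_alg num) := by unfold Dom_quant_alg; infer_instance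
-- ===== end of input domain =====

-- B replaces A's recursive halving count by the closed form max(1, bit_length num) (simpler: no recursion).

-- ===== PORT A =====
-- literal port of A's recursion; the `num < 0` guard only closes the branch where
-- Python diverges (RecursionError), which Pre_ excludes.
def quant_alg (num : Int) : Int :=
  if num == 1 || num == 0 then 1
  else if num < 0 then 0  -- Python recurses forever here; outside Pre_
  else (if PySem.Int.floordiv num 2 > 0 then 1 else 0) + quant_alg (PySem.Int.floordiv num 2)
termination_by num.toNat
decreasing_by
  rename_i h1 h2
  simp at h1
  rw [PySem.Int.floordiv_eq_ediv_of_pos (by omega)]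
  omega

-- ===== PORT B =====
-- hand port of Python's int.bit_length (exact for all ints: bit_length of n is
-- 0 for n = 0, else floor(log2 |n|) + 1)
def pyBitLength (num : Int) : Int :=
  if num.natAbs = 0 then 0 else (Nat.log2 num.natAbs : Int) + 1

def quant_alg_alt (num : Int) : Int := max 1 (pyBitLength num)

-- ===== PRECONDITION & SPEC =====
-- Pre_ excludes num < 0, where Python's A raises RecursionError (infinite recursion).
def Pre_quant_alg (num : Int) : Prop := 0 ≤ num
instance (num : Int) : Decidable (Pre_quant_alg num) := by unfold Pre_quant_alg; infer_instance
def pvWitness_quant_alg : Int := (13)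

def Spec_quant_alg (num : Int) (out : Int) : Prop := out = quant_alg_alt num
instance (num : Int) (out : Int) : Decidable (Spec_quant_alg num out) := by unfold Spec_quant_alg; infer_instance

-- ===== CLAIM (what is proved, stated in full; the proofs are below) =====
def Claim_equal_quant_alg : Prop := ∀ (num : Int), Dom_quant_alg num → Pre_quant_alg num → Spec_quant_alg num (quant_alg num)

-- ===== LEMMAS AND PROOFS =====

-- for nonnegative num, A's recursion computes max 1 (bit length of num)
theorem quant_alg_eq_aux (k : Nat) : ∀ (n : Int), n.toNat ≤ k → 0 ≤ n →
    quant_alg n = max 1 (pyBitLength n) := by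
  induction k with
  | zero =>
    intro n hk h
    have : n = 0 := by omega
    subst this
    rw [quant_alg]; simp [pyBitLength]
  | succ k ih =>
    intro n hk h
    by_cases hb : n = 1 ∨ n = 0
    · rcases hb with h1 | h1 <;> subst h1 <;> rw [quant_alg] <;>
        simp [pyBitLength, Nat.log2]
    · have hn2 : 2 ≤ n := by omega
      have hneg : ¬ n < 0 := by omega
      have hbf : (n == 1 || n == 0) = false := by simp; omega
      have hfd : PySem.Int.floordiv n 2 = n / 2 :=
        PySem.Int.floordiv_eq_ediv_of_pos (by omega)
      rw [quant_alg, hbf]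
      simp only [Bool.false_eq_true, if_false, hfd]
      rw [if_neg hneg, if_pos (by omega : (0:Int) < n / 2),
        ih (n / 2) (by omega) (by omega)]
      -- bit length of n is bit length of n/2 plus 1, for 2 ≤ n
      have hna : (2 : Nat) ≤ n.natAbs := by omega
      have hhalf : (n / 2).natAbs = n.natAbs / 2 := by omega
      have hlog : Nat.log2 n.natAbs = Nat.log2 (n.natAbs / 2) + 1 := by
        rw [Nat.log2_eq_log_two, Nat.log2_eq_log_two, Nat.log_div_base]
        have := Nat.log_pos (b := 2) (by norm_num) (by omega : 2 ≤ n.natAbs)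
        omega
      have hpos2 : (0:Int) < n / 2 := by omega
      unfold pyBitLength
      rw [hhalf, hlog]
      have h1 : ¬ n.natAbs = 0 := by omega
      have h2 : ¬ n.natAbs / 2 = 0 := by omega
      rw [if_neg h1, if_neg h2]
      push_cast
      omega

-- ===== VERDICT (by name: the statement is the Claim_ definition above) =====
theorem quant_alg_spec : Claim_equal_quant_alg := by
  intro num _ hpre
  unfold Spec_quant_alg quant_alg_alt
  exact quant_alg_eq_aux num.toNat num le_rfl hpre
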